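/- GENERATED by mk_final_copies.py from the proof of the farm's unit `start_decoder.F6d` (farm:start_decoder.F6d.1: Proof.lean) as the
   re-elaboration sweep compiled it — do not edit. -/
import Asan.CheckWalk
import Vorbis.Spec.Units.start_decoder_F6d
import Vorbis.Spec.Worked.start_decoder_F6d_Lemmas
import Vorbis.Spec.StartDecoderFloor

open X86 X86.User Asan Vorbis Vorbis.Spec Vorbis.Spec.StartDecoder

set_option maxRecDepth 100000
set_option maxHeartbeats 4000000

namespace Vorbis.Spec.start_decoder_F6d

/-- A small counter held zero-extended in a 32-bit register, as a signed number. -/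
theorem f6d_part32_toInt (k : Nat) (hk : k < 2 ^ 31) : (Word.part .w32 (UInt64.ofNat k)).toInt = (k : Int) := by
  rw [Vorbis.Spec.part32_toInt, Code.toNat_ofNat_lt _ (by omega)]
  have c1 := sint32_cases (k % 2 ^ 32)
  omega

/-- **One round of loop 4023** (0x115809 … 0x115840) from the clauses of `AtF6S`: the exit to F7 when `values ≤ j`, else the checked
load of `p[j].id`, the checked byte store into `sorted_order[j]`, `++j`, back at the head. -/
theorem f6d_round (Lay : Layout) (hLay : Lay.hi = 0x1000000) (μ : Microarch) (hμ : UserX.MicroOK μ) (u₀ : State)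
    (hcode : HasCodeNat Lay u₀ Vorbis.L.start_decoder.entry Vorbis.Code.code_start_decoder.nat Vorbis.L.start_decoder.size)
    (hload2 : Asan.SmallCheck Lay μ Vorbis.WayInv (Vorbis.CodeOK u₀) [.rax, .rcx, .rdx] 2 Vorbis.L.__asan_load2_noabort.entry)
    (hstore1 : Asan.SmallCheck Lay μ Vorbis.WayInv (Vorbis.CodeOK u₀) [.rax, .rdx] 1 Vorbis.L.__asan_store1_noabort.entry)
    (g : Ghost) (i : Nat) (A5 : Arena) (A : Arena × List Obj) (mc : Int) (n j : Nat) (v : State)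
    (hv : InF6 u₀ g i A5 A mc n Vorbis.L.start_decoder.loop25 v)
    (hpid : PID v.mem (floorAt g v.mem i) (g.R + 0x120))
    (hr13w : v.reg .r13 = word32 (Floor1.values v.mem (floorAt g v.mem i))) (hr12 : v.reg .r12 = UInt64.ofNat j)
    (hj : (j : Int) ≤ Floor1.values v.mem (floorAt g v.mem i)) (hsorted : SortedUpTo v.mem (floorAt g v.mem i) j) :
    ReachVia Lay μ WayInv v (fun w =>
      (AtF6S u₀ g i w ∧ 250 - (w.reg .r12).toNat < 250 - (v.reg .r12).toNat) ∨ AtF7 u₀ g i w) := by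
  have hst := St.of_inF6 hv
  have hlt : (i : Int) < stb_vorbis.floor_count v.mem g.f := hv.cur.base.base.lt
  have hgeo := Floor.geo hv.loop hlt
  obtain ⟨n1, n2, n3, n4⟩ := hst.nums
  have hspn : (v.reg .rsp).toNat = g.R := by
    rw [hst.rsp]
    exact toNat_addr _ (by omega)
  have hwg := hst.where_g
  have hlg := hst.live_g
  obtain ⟨V, hVr, hV2, hV250, hVi⟩ := values_read hst.part.cur
  have hgbn : (v.reg .rbx).toNat = floorAt g v.mem i := by
    rw [hst.rbx]
    exact toNat_addr _ (by omega)
  have hr13 : v.reg .r13 = UInt64.ofNat V := by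
    rw [hr13w, hVi]
    exact word32_nonneg _ (by omega) (by omega)
  have w_rip := hst.rip
  have w_eq : Mem.EqOn Vorbis.L.textLo Vorbis.L.textHi u₀.mem v.mem := hst.code
  have hdf : v.flags .df = false := (show abiInv _ from hst.inv).1
  have hmx : v.mxcsr &&& 0x1F80 = 0x1F80 := (show abiInv _ from hst.inv).2
  have hsse := Vorbis.sseOK_of_abiInv hst.inv
  have hsh := hst.part.shadow
  rw [hVi] at hj
  have hjV : j ≤ V := by omega
  have hr12n : (v.reg .r12).toNat = j := by
    rw [hr12]
    exact Code.toNat_ofNat_lt _ (by omega)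
  generalize hgi : floorAt g v.mem i = gi at *
  u_walk hcode [hμ.vendor] until [Vorbis.L.start_decoder.loop25, Vorbis.L.start_decoder.cut227] span [Vorbis.L.textLo, Vorbis.L.textHi] side (v_side)
  case check_115819 =>
    -- 0x115819: load2 `p[j].id`
    have hJ := f6_sext_ofNat j (by omega)
    have hlt' : j < V := by
      rw [f6d_part32_toInt V (by omega), f6d_part32_toInt j (by omega)] at hbr_11580c
      omega
    generalize Word.ofBV (BitVec.signExtend 64 (Word.part Width.w32 (UInt64.ofNat j))) = J at *
    have hun : ShadowUntouched v.mem s_115819.mem := by v_untouched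
    exact (live_p g A).accSmall hsh hun _ 2 (by decide) (by u_omega) (by u_omega)
  case check_11582f =>
    -- 0x11582f: store1 `g->sorted_order[j]`
    have hJ := f6_sext_ofNat j (by omega)
    have hlt' : j < V := by
      rw [f6d_part32_toInt V (by omega), f6d_part32_toInt j (by omega)] at hbr_11580c
      omega
    generalize Word.ofBV (BitVec.signExtend 64 (Word.part Width.w32 (UInt64.ofNat j))) = J at *
    have hun : ShadowUntouched v.mem s_11582f.mem := by v_untouched
    exact hlg.accSmall hsh hun _ 1 (by decide) (by u_omega) (by u_omega)
  case side_code =>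
    -- the store misses the text
    have hJ := f6_sext_ofNat j (by omega)
    have hlt' : j < V := by
      rw [f6d_part32_toInt V (by omega), f6d_part32_toInt j (by omega)] at hbr_11580c
      omega
    generalize Word.ofBV (BitVec.signExtend 64 (Word.part Width.w32 (UInt64.ofNat j))) = J at *
    u_omega
  · -- 0x11580c `jle 115842` taken: `values ≤ j`, the loop is done
    have hge : V ≤ j := by
      rw [f6d_part32_toInt V (by omega), f6d_part32_toInt j (by omega)] at hbr_11580c
      omega
    subst hgi
    have hloop' : FloorLoop u₀ g pc_F7 i A5 A s_11580c := by
      refine Floor.same_mem hv.loop w_mem w_rip ?_ ?_ (by v_inv)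
      · rw [w_kept.get .rsp rfl]
        exact hst.rsp
      · rw [w_kept.get .rbp rfl]
        exact hst.rbp
    refine ReachVia.done (Or.inr ?_)
    refine F6.atF7_of_loop (j := j) hv ?_ hsorted hloop' w_mem (w_kept.get .rbx rfl) ?_
    · rw [hVi]
      omega
    · rw [hVi]
      omega
  · -- the back edge 0x115840 → 0x115809
    have hJ := f6_sext_ofNat j (by omega)
    have hlt' : j < V := by
      rw [f6d_part32_toInt V (by omega), f6d_part32_toInt j (by omega)] at hbr_11580c
      omega
    generalize Word.ofBV (BitVec.signExtend 64 (Word.part Width.w32 (UInt64.ofNat j))) = J at *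
    have hun : ShadowUntouched v.mem s_115840.mem := by v_untouched
    have hs : Mem.SameExcept [⟨g.R - 8, g.R⟩, ⟨gi + 838 + j, gi + 839 + j⟩] v.mem s_115840.mem := by
      rw [w_mem]
      u_same
    have hws : ∀ w, w ∈ [(⟨g.R - 8, g.R⟩ : Span), ⟨gi + 838 + j, gi + 839 + j⟩] →
        Floor.Quiet g (floorAt g v.mem i) (838 + j) (839 + j) w := by
      rw [hgi]
      intro w hwm
      simp only [List.mem_cons, List.mem_nil_iff, or_false] at hwm
      rcases hwm with rfl | rfl <;> unfold Floor.Quiet <;> simp only [] <;> omega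
    have hwsW : ∀ w, w ∈ [(⟨g.R - 8, g.R⟩ : Span), ⟨gi + 838 + j, gi + 839 + j⟩] →
        Floor.Win g (floorAt g v.mem i) (838 + j) (839 + j) w := fun w hwm => (hws w hwm).win
    have hrsp' : s_115840.reg .rsp = addr g.R := by
      rw [w_rsp]
      exact hst.rsp
    have hrbp' : s_115840.reg .rbp = addr g.f := by
      rw [w_kept.get .rbp rfl]
      exact hst.rbp
    have hloop' : FloorLoop u₀ g Vorbis.L.start_decoder.loop25 i A5 A s_115840 :=
      Floor.carry_quiet (lo := 838 + j) (hi := 839 + j) hv.loop hlt (by omega) w_rip hrsp' hrbp' (by v_inv) w_eq hs hws hun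
    obtain ⟨eG, _, _, _⟩ := Floor.fields_same hgeo hs hwsW (by omega)
    have hcur' : Floor6 g s_115840.mem i mc n :=
      Floor.floor6_carry hgeo hv.cur hv.n_le (by omega) (by omega) (by omega) hs hwsW
    have EB := Floor.elem_below hgeo hs (fun w hwm => (hwsW w hwm).winT (i := i)) (by omega) (by omega)
    have EA := Floor.elem_above hgeo hs (fun w hwm => (hwsW w hwm).winT (i := i)) (by omega) (by omega)
    rw [hgi] at eG EB EA
    -- `values` is above the written byte
    have ev : Floor1.values s_115840.mem gi = Floor1.values v.mem gi := by
      simp only [vacc, voff]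
      exact congrArg sint32 (EA.u32 _ (by omega) (by omega) (by omega))
    -- the records of `p` are not written
    have eid : ∀ q : Nat, q < 250 →
        stbv__floor_ordering.id s_115840.mem (pAt (g.R + 0x120) q) = stbv__floor_ordering.id v.mem (pAt (g.R + 0x120) q) := by
      intro q hq
      simp only [vacc, pAt, voff]
      unfold Mem.u16
      have ea := toNat_addr (g.R + 288 + 4 * q + 2) (by omega)
      apply hs.readLE _ 2 (by omega)
      intro w hwm
      simp only [List.mem_cons, List.mem_nil_iff, or_false] at hwm
      rcases hwm with rfl | rfl
      · simp only []
        omega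
      · simp only []
        omega
    have hpid' : PID s_115840.mem gi (g.R + 0x120) := by
      apply hpid.of_eq ev
      intro q hq
      exact eid q (by omega)
    have e12 : s_115840.reg .r12 = UInt64.ofNat (j + 1) := by
      rw [w_r12]
      exact f6_inc32_ofNat j (by omega)
    -- the byte stored is `p[j].id`, below `values` by PID
    have hb := hpid.byte (j := j) (by omega) (by omega)
    have hnew : (Floor1.sorted_order s_115840.mem gi j : Int) < Floor1.values v.mem gi := by
      have hX : (v.mem.writeLE (v.reg .rsp - 8) 8 1136670).readLE (v.reg .rsp + J * 4 + 290) 2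
          = stbv__floor_ordering.id v.mem (pAt (g.R + 0x120) j) := by
        simp only [vacc, pAt, voff]
        unfold Mem.u16
        have ea2 : addr (g.R + 288 + 4 * j + 2) = v.reg .rsp + J * 4 + 290 := (eq_addr _ _ (by u_omega)).symm
        have ea3 := toNat_addr (g.R + 288 + 4 * j + 2) (by omega)
        rw [← ea2]
        have hs1 : Mem.SameExcept [⟨g.R - 8, g.R⟩] v.mem (v.mem.writeLE (v.reg .rsp - 8) 8 1136670) := by
          u_same
        apply hs1.readLE _ 2 (by omega)
        intro w hwm
        simp only [List.mem_cons, List.mem_nil_iff, or_false] at hwm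
        subst hwm
        simp only []
        omega
      rw [hVi]
      simp only [vacc, voff]
      have ea : addr (gi + 838 + j) = v.reg .rbx + J + 838 := (eq_addr _ _ (by u_omega)).symm
      rw [w_mem, ← ea, Mem.u8_writeLE_same, hX]
      simp only [BitVec.toNat_setWidth, BitVec.toNat_ofNat]
      have h1 := hb.1
      have h2 := hb.2
      rw [hVi] at h2
      omega
    have hsorted' : SortedUpTo s_115840.mem gi (j + 1) := by
      apply hsorted.step ev
      · intro q hq
        simp only [vacc, voff]
        exact EB.u8 _ (by omega) (by omega) (by omega)
      · exact hnew
    refine ReachVia.done (Or.inl ⟨?_, ?_⟩)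
    · unfold AtF6S
      refine ⟨A5, A, mc, n, j + 1, ⟨hloop', ?_, hcur', hv.n_le⟩, ?_, ?_, e12, ?_, ?_⟩
      · rw [w_kept.get .rbx rfl, eG, ← hgi]
        exact hv.rbx
      · rw [eG]
        exact hpid'
      · rw [w_kept.get .r13 rfl, eG, ev]
        exact hr13w
      · rw [eG, ev, hVi]
        omega
      · rw [eG]
        exact hsorted'
    · rw [e12, Code.toNat_ofNat_lt _ (by omega), Code.toNat_ofNat_lt _ (by omega)]
      omega

end Vorbis.Spec.start_decoder_F6d

theorem Vorbis.Spec.Worked.start_decoder_F6d_ok : Vorbis.Spec.start_decoder_F6d.Statement := by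
  intro Lay hLay μ hμ u₀ hcode hload2 hstore1 g i v hat
  obtain ⟨A5, A, mc, n, j, hv, hpid, hr13, hr12, hj, hsorted⟩ := hat
  exact Vorbis.Spec.start_decoder_F6d.f6d_round Lay hLay μ hμ u₀ hcode hload2 hstore1 g i A5 A mc n j v hv hpid hr13 hr12 hj hsorted
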